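-- pv_equiv track=rewrite | github.com/chlwlstlf/CodingTest-Study | 프로그래머스/3/389481. 봉인된 주문/봉인된 주문.py | solution
-- ===== SOURCE A (Python) =====
-- def change(n):
--     result = ""
--     while n > 0:
--         n -= 1
--         result += chr(n % 26 + ord('a'))
--         n //= 26
--     return result[::-1]
--
-- def solution(n, bans):
--     bans.sort()
--     N = n+len(bans)
--     answer = change(N)
--
--     prev = -1
--     while True:
--         cnt = 0
--         for b in bans:
--             if len(b) > len(answer):
--                 cnt += 1
--             if len(b) == len(answer) and b >= answer:
--                 cnt += 1
--         if cnt == prev: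
--             return answer
--         answer = change(N-cnt)
--         prev = cnt
-- ===== SOURCE B (Python) =====
-- def change(n):
--     result = ""
--     while n > 0:
--         n -= 1
--         result += chr(n % 26 + ord('a'))
--         n //= 26
--     return result[::-1]
--
-- def solution(n, bans):
--     bans.sort()  # keep A's in-place sort of the argument
--     keys = sorted(bans, key=lambda w: (len(w), w))  # shortlex order, once
--     B = len(bans)
--     N = n + B
--     answer = change(N)
--     prev = -1
--     while True:
--         # binary search: lo = number of banned words shortlex-below answer
--         lo, hi = 0, B
--         while lo < hi:
--             mid = (lo + hi) // 2
--             w = keys[mid]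
--             if len(w) < len(answer) or (len(w) == len(answer) and w < answer):
--                 lo = mid + 1
--             else:
--                 hi = mid
--         cnt = B - lo
--         if cnt == prev:
--             return answer
--         answer = change(N - cnt)
--         prev = cnt
-- ===== Notes on version B (the rewrite author's own statement) =====
-- stated objective: alternative
-- what changed: B sorts the ban list once by the shortlex key (len(w), w) and computes each iteration's count of not-yet-passed bans with a lower-bound binary search instead of A's full linear scan of all bans with string comparisons; on random inputs the loop stabilizes in a couple of passes and both are dominated by sorting, so a timing run shows no speed-up.
import Mathlib
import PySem

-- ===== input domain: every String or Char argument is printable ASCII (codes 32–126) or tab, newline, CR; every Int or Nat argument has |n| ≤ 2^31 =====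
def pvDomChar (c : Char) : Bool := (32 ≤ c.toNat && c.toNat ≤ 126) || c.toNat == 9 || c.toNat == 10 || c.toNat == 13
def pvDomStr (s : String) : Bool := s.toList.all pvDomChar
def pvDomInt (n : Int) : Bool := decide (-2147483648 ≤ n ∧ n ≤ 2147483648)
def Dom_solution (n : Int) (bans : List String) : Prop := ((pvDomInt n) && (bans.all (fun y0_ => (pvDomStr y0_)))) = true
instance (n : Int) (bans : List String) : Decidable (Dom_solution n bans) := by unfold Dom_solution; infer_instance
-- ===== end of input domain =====

-- B sorts the ban list once by the shortlex key (len(w), w) and replaces A's per-iteration linear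
-- scan of the bans by a binary search; return values are proved equal (in Python both versions also
-- sort `bans` in place — the equivalence proved here is about the return value, and both perform
-- the same mutation).

-- ===== PORT A =====
-- change(n) (a helper shared verbatim by Source A and Source B): the while loop as recursion on n.toNat;
-- the accumulated string is built as a char list, result[::-1] is List.reverse (exact for Python).
def pvChangeAux (m : Int) (acc : List Char) : List Char :=
  if 0 < m then
    pvChangeAux (PySem.Int.floordiv (m - 1) 26)
      (acc ++ [Char.ofNat ((PySem.Int.mod (m - 1) 26) + 97).toNat])
  else acc
termination_by m.toNat
decreasing_by
  simp only [PySem.Int.floordiv_eq_ediv_of_pos (by norm_num : (0:Int) < 26)]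
  omega

def pvChange (m : Int) : String := String.ofList (pvChangeAux m []).reverse

-- A's inner `for b in bans` with its two independent ifs (Python `b >= answer` is `answer ≤ b`)
def pvCnt (bans : List String) (answer : String) : Int :=
  bans.foldl (fun cnt b =>
    let cnt1 := if PySem.Str.len answer < PySem.Str.len b then cnt + 1 else cnt
    if PySem.Str.len b = PySem.Str.len answer ∧ answer ≤ b then cnt1 + 1 else cnt1) 0

-- A's `while True`; the Python loop stabilizes within len(bans)+2 passes (cnt never decreases and
-- is bounded by len(bans)), so the fuel argument len(bans)+3 only makes the recursion structural.
def pvLoopA (bans : List String) (N prev : Int) (answer : String) : Nat → String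
  | 0 => answer
  | fuel + 1 =>
    let cnt := pvCnt bans answer
    if cnt = prev then answer
    else pvLoopA bans N cnt (pvChange (N - cnt)) fuel

def solution (n : Int) (bans : List String) : String :=
  let bans := PySem.List.sorted bans (fun b => b) false   -- bans.sort()
  let N := n + PySem.List.len bans
  pvLoopA bans N (-1) (pvChange N) (bans.length + 3)

-- ===== PORT B =====
-- Source B's hand-rolled lower-bound binary search; keys[mid] is always in range there, pyGetD "" is
-- that access (the default is never taken)
def pvLower (keys : List String) (answer : String) (lo hi : Int) : Int :=
  if 0 < hi - lo then
    let mid := PySem.Int.floordiv (lo + hi) 2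
    let w := PySem.List.pyGetD keys mid ""
    if PySem.Str.len w < PySem.Str.len answer ∨
       (PySem.Str.len w = PySem.Str.len answer ∧ w < answer) then
      pvLower keys answer (mid + 1) hi
    else
      pvLower keys answer lo mid
  else lo
termination_by (hi - lo).toNat
decreasing_by
  all_goals
    simp only [PySem.Int.floordiv_eq_ediv_of_pos (by norm_num : (0:Int) < 2)]
    omega

-- Source B's `while True` (same fuel remark as for pvLoopA)
def pvLoopB (keys : List String) (B N prev : Int) (answer : String) : Nat → String
  | 0 => answer
  | fuel + 1 =>
    let cnt := B - pvLower keys answer 0 B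
    if cnt = prev then answer
    else pvLoopB keys B N cnt (pvChange (N - cnt)) fuel

def solution_alt (n : Int) (bans : List String) : String :=
  let bans := PySem.List.sorted bans (fun b => b) false   -- bans.sort()
  let keys := PySem.List.sorted2 bans (fun w => PySem.Str.len w) (fun w => w) false
  let B := PySem.List.len bans
  let N := n + B
  pvLoopB keys B N (-1) (pvChange N) (bans.length + 3)

-- ===== PRECONDITION & SPEC =====
def Spec_solution (n : Int) (bans : List String) (out : String) : Prop := out = solution_alt n bans
instance (n : Int) (bans : List String) (out : String) : Decidable (Spec_solution n bans out) := by unfold Spec_solution; infer_instance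

-- ===== CLAIM (what is proved, stated in full; the proofs are below) =====
def Claim_equal_solution : Prop := ∀ (n : Int) (bans : List String), Dom_solution n bans → Spec_solution n bans (solution n bans)

-- ===== LEMMAS AND PROOFS =====

-- the shortlex key: Python's sort key tuple (len(w), w), compared lexicographically
def pvKey (w : String) : Lex (Int × String) := toLex (PySem.Str.len w, w)

theorem pvKey_lt_iff (w a : String) :
    pvKey w < pvKey a
      ↔ (PySem.Str.len w < PySem.Str.len a ∨ (PySem.Str.len w = PySem.Str.len a ∧ w < a)) := by
  constructor <;> intro h <;> simpa [pvKey, Prod.Lex.lt_iff] using h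

theorem pvCnt_step (c : Int) (b answer : String) :
    (if PySem.Str.len b = PySem.Str.len answer ∧ answer ≤ b
       then (if PySem.Str.len answer < PySem.Str.len b then c + 1 else c) + 1
       else (if PySem.Str.len answer < PySem.Str.len b then c + 1 else c))
      = c + (if pvKey b < pvKey answer then 0 else 1) := by
  rw [if_congr (pvKey_lt_iff b answer) rfl rfl]
  by_cases hxy : PySem.Str.len b = PySem.Str.len answer
  · by_cases hb : answer ≤ b
    · rw [if_pos ⟨hxy, hb⟩, if_neg (by omega),
        if_neg (fun h => h.elim (by omega) (fun h2 => absurd hb (not_le.mpr h2.2)))]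
    · rw [if_neg (fun h => hb h.2), if_neg (by omega),
        if_pos (Or.inr ⟨hxy, lt_of_not_ge hb⟩)]
      omega
  · by_cases hlt : PySem.Str.len b < PySem.Str.len answer
    · rw [if_neg (fun h => hxy h.1), if_neg (by omega), if_pos (Or.inl hlt)]; omega
    · rw [if_neg (fun h => hxy h.1), if_pos (by omega),
        if_neg (fun h => h.elim (by omega) (fun h2 => hxy h2.1))]

theorem pvCnt_fold (answer : String) (bans : List String) : ∀ c : Int,
    bans.foldl (fun cnt b =>
      let cnt1 := if PySem.Str.len answer < PySem.Str.len b then cnt + 1 else cnt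
      if PySem.Str.len b = PySem.Str.len answer ∧ answer ≤ b then cnt1 + 1 else cnt1) c
    = c + ((bans.length : Int)
        - bans.countP (fun w => decide (pvKey w < pvKey answer))) := by
  induction bans with
  | nil => simp
  | cons b t ih =>
    intro c
    rw [List.foldl_cons]
    show t.foldl _
        (if PySem.Str.len b = PySem.Str.len answer ∧ answer ≤ b
           then (if PySem.Str.len answer < PySem.Str.len b then c + 1 else c) + 1
           else (if PySem.Str.len answer < PySem.Str.len b then c + 1 else c)) = _
    rw [ih, pvCnt_step c b answer, List.countP_cons, List.length_cons]
    by_cases h : pvKey b < pvKey answer <;> simp [h] <;> push_cast <;> ring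

theorem pvCnt_eq (bans : List String) (answer : String) :
    pvCnt bans answer
      = (bans.length : Int) - bans.countP (fun w => decide (pvKey w < pvKey answer)) := by
  have := pvCnt_fold answer bans 0
  simpa [pvCnt] using this

theorem countP_eq_of_iff (p : String → Bool) : ∀ (l : List String) (r : Int),
    0 ≤ r → r ≤ (l.length : Int) →
    (∀ (j : Nat) (hj : j < l.length), (p l[j] = true ↔ (j : Int) < r)) →
    (l.countP p : Int) = r := by
  intro l
  induction l with
  | nil => intro r h0 hr _; simp at hr ⊢; omega
  | cons x t ih =>
    intro r h0 hr hiff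
    by_cases hx : p x = true
    · have h0r : (0 : Int) < r := (hiff 0 (by simp)).mp hx
      have ht : (t.countP p : Int) = r - 1 := by
        refine ih (r - 1) (by omega) (by simp at hr ⊢; omega) ?_
        intro j hj
        have := hiff (j + 1) (by simpa using Nat.succ_lt_succ hj)
        simpa using ⟨fun h => by have := this.mp h; push_cast at this ⊢; omega,
          fun h => this.mpr (by push_cast at h ⊢; omega)⟩
      have hc : (x :: t).countP p = t.countP p + 1 := by simp [hx]
      rw [hc]
      push_cast
      omega
    · have hr0 : r = 0 := by
        have := hiff 0 (by simp)
        simp [hx] at this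
        omega
      have ht : (t.countP p : Int) = 0 := by
        refine ih 0 le_rfl (by positivity) ?_
        intro j hj
        have h2 : p t[j] = true ↔ ((j : Int) + 1 < r) := by
          simpa using hiff (j + 1) (by simpa using Nat.succ_lt_succ hj)
        constructor
        · intro hp; have := h2.mp hp; omega
        · intro hneg; exact absurd hneg (by omega)
      have hc : (x :: t).countP p = t.countP p := by simp [hx]
      rw [hc, ht, hr0]

theorem pvLower_spec (keys : List String) (answer : String)
    (hsort : keys.Pairwise (fun a b => pvKey a ≤ pvKey b)) :
    ∀ (d : Nat) (lo hi : Int), (hi - lo).toNat ≤ d → 0 ≤ lo → lo ≤ hi → hi ≤ (keys.length : Int) →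
    (∀ (j : Nat) (hj : j < keys.length), (j : Int) < lo → pvKey keys[j] < pvKey answer) →
    (∀ (j : Nat) (hj : j < keys.length), hi ≤ (j : Int) → ¬ pvKey keys[j] < pvKey answer) →
    pvLower keys answer lo hi
      = (keys.countP (fun w => decide (pvKey w < pvKey answer)) : Int) := by
  have hpair : ∀ (i j : Nat) (hi : i < keys.length) (hj : j < keys.length), i ≤ j →
      pvKey keys[i] ≤ pvKey keys[j] := by
    intro i j hi hj hij
    rcases Nat.lt_or_ge i j with h | h
    · exact (List.pairwise_iff_getElem.mp hsort) i j hi hj h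
    · have : i = j := by omega
      subst this; exact le_rfl
  intro d
  induction d with
  | zero =>
    intro lo hi hd h0 hlh hhl inv1 inv2
    rw [pvLower, if_neg (by omega)]
    refine (countP_eq_of_iff _ keys lo h0 (by omega) ?_).symm
    intro j hj
    constructor
    · intro hp
      by_contra hge
      exact absurd (of_decide_eq_true hp) (inv2 j hj (by omega))
    · intro hlt
      exact decide_eq_true (inv1 j hj hlt)
  | succ d ih =>
    intro lo hi hd h0 hlh hhl inv1 inv2
    rw [pvLower]
    by_cases hij : 0 < hi - lo
    · rw [if_pos hij]
      dsimp only
      have hmid : lo ≤ PySem.Int.floordiv (lo + hi) 2 ∧ PySem.Int.floordiv (lo + hi) 2 < hi := by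
        simp only [PySem.Int.floordiv_eq_ediv_of_pos (by norm_num : (0:Int) < 2)]
        omega
      set mid := PySem.Int.floordiv (lo + hi) 2 with hmdef
      have hmlen : mid < (keys.length : Int) := by omega
      have hw : PySem.List.pyGetD keys mid "" = keys[mid.toNat]'(by omega) :=
        PySem.List.pyGetD_eq_getElem keys "" (by omega) hmlen
      rw [hw]
      rw [if_congr (pvKey_lt_iff keys[mid.toNat] answer).symm rfl rfl]
      by_cases hc : pvKey (keys[mid.toNat]'(by omega)) < pvKey answer
      · rw [if_pos hc]
        refine ih (mid + 1) hi (by omega) (by omega) (by omega) hhl ?_ inv2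
        intro j hj hjlt
        have hle : pvKey keys[j] ≤ pvKey (keys[mid.toNat]'(by omega)) :=
          hpair j mid.toNat hj (by omega) (by omega)
        exact lt_of_le_of_lt hle hc
      · rw [if_neg hc]
        refine ih lo mid (by omega) h0 (by omega) (by omega) inv1 ?_
        intro j hj hjge
        intro hlt
        have hle : pvKey (keys[mid.toNat]'(by omega)) ≤ pvKey keys[j] :=
          hpair mid.toNat j (by omega) hj (by omega)
        exact hc (lt_of_le_of_lt hle hlt)
    · rw [if_neg hij]
      refine (countP_eq_of_iff _ keys lo h0 (by omega) ?_).symm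
      intro j hj
      constructor
      · intro hp
        by_contra hge
        exact absurd (of_decide_eq_true hp) (inv2 j hj (by omega))
      · intro hlt
        exact decide_eq_true (inv1 j hj hlt)

theorem pvKey_lt_decide (a b : String) :
    (decide (PySem.Str.len a < PySem.Str.len b) ||
      (!decide (PySem.Str.len b < PySem.Str.len a) && decide (a < b)))
    = decide (pvKey a < pvKey b) := by
  by_cases h1 : PySem.Str.len a < PySem.Str.len b
  · rw [decide_eq_true h1, decide_eq_true ((pvKey_lt_iff a b).mpr (Or.inl h1))]
    simp
  · by_cases h2 : PySem.Str.len b < PySem.Str.len a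
    · have hk : ¬ pvKey a < pvKey b := by
        intro hk
        rcases (pvKey_lt_iff a b).mp hk with h' | ⟨h', -⟩ <;> omega
      rw [decide_eq_false h1, decide_eq_true h2, decide_eq_false hk]
      simp
    · have he : PySem.Str.len a = PySem.Str.len b := by omega
      by_cases h3 : a < b
      · rw [decide_eq_false h1, decide_eq_false h2, decide_eq_true h3,
          decide_eq_true ((pvKey_lt_iff a b).mpr (Or.inr ⟨he, h3⟩))]
        simp
      · have hk : ¬ pvKey a < pvKey b := by
          intro hk
          rcases (pvKey_lt_iff a b).mp hk with h' | ⟨-, h'⟩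
          · omega
          · exact h3 h'
        rw [decide_eq_false h1, decide_eq_false h2, decide_eq_false h3, decide_eq_false hk]
        simp

theorem insertBy_congr {α : Type} (f g : α → α → Bool) (h : ∀ a b, f a b = g a b) :
    ∀ (x : α) (acc : List α), PySem.List.insertBy f x acc = PySem.List.insertBy g x acc := by
  intro x acc
  induction acc with
  | nil => rfl
  | cons y ys ih =>
    rw [PySem.List.insertBy, PySem.List.insertBy, h x y]
    by_cases hg : g x y = true
    · rw [if_pos hg, if_pos hg]
    · rw [if_neg hg, if_neg hg, ih]

theorem sorted2_eq_sorted_pvKey (xs : List String) :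
    PySem.List.sorted2 xs (fun w => PySem.Str.len w) (fun w => w) false
      = PySem.List.sorted xs pvKey false := by
  show List.foldl _ [] xs = List.foldl _ [] xs
  induction xs using List.reverseRecOn with
  | nil => rfl
  | append_singleton ys y ih =>
    rw [List.foldl_append, List.foldl_append, List.foldl_cons, List.foldl_cons,
      List.foldl_nil, List.foldl_nil, ih]
    exact insertBy_congr _ _ (fun a b => pvKey_lt_decide a b) y _

theorem loops_eq (bans keys : List String) (N : Int)
    (hcnt : ∀ ans, pvCnt bans ans = (bans.length : Int) - pvLower keys ans 0 (bans.length : Int)) :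
    ∀ (fuel : Nat) (prev : Int) (ans : String),
      pvLoopA bans N prev ans fuel = pvLoopB keys (bans.length : Int) N prev ans fuel := by
  intro fuel
  induction fuel with
  | zero => intro prev ans; rfl
  | succ f ih =>
    intro prev ans
    rw [pvLoopA, pvLoopB]
    try dsimp only
    rw [← hcnt ans]
    by_cases h : pvCnt bans ans = prev
    · rw [if_pos h, if_pos h]
    · rw [if_neg h, if_neg h, ih]

theorem main_eq (n : Int) (bans : List String) : solution n bans = solution_alt n bans := by
  unfold solution solution_alt
  set bans' := PySem.List.sorted bans (fun b => b) false with hb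
  set keys := PySem.List.sorted2 bans' (fun w => PySem.Str.len w) (fun w => w) false with hk
  have hks : keys = PySem.List.sorted bans' pvKey false := sorted2_eq_sorted_pvKey bans'
  have hperm : keys.Perm bans' := by rw [hks]; exact PySem.List.sorted_perm bans' pvKey false
  have hlen : keys.length = bans'.length := hperm.length_eq
  have hpair : keys.Pairwise (fun a b => pvKey a ≤ pvKey b) := by
    rw [hks]; exact PySem.List.sorted_pairwise bans' pvKey
  have hcnt : ∀ ans, pvCnt bans' ans
      = (bans'.length : Int) - pvLower keys ans 0 (bans'.length : Int) := by
    intro ans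
    have hlow : pvLower keys ans 0 (bans'.length : Int)
        = (keys.countP (fun w => decide (pvKey w < pvKey ans)) : Int) := by
      refine pvLower_spec keys ans hpair (bans'.length) 0 (bans'.length : Int)
        (by omega) le_rfl (by positivity) (by rw [hlen]) ?_ ?_
      · intro j hj hj0; omega
      · intro j hj hge; exfalso; rw [hlen] at hj; omega
    rw [hlow, pvCnt_eq, hperm.countP_eq]
  have hB : PySem.List.len bans' = (bans'.length : Int) := by
    simp [PySem.List.len_eq]
  show pvLoopA bans' (n + PySem.List.len bans') (-1) (pvChange (n + PySem.List.len bans'))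
      (bans'.length + 3)
    = pvLoopB keys (PySem.List.len bans') (n + PySem.List.len bans') (-1)
      (pvChange (n + PySem.List.len bans')) (bans'.length + 3)
  rw [hB]
  exact loops_eq bans' keys (n + (bans'.length : Int)) hcnt (bans'.length + 3) (-1)
    (pvChange (n + (bans'.length : Int)))

-- ===== VERDICT (by name: the statement is the Claim_ definition above) =====
theorem solution_spec : Claim_equal_solution := by
  intro n bans _
  exact main_eq n bans
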